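-- pv_equiv track=rewrite | github.com/tangjiewei0336/ascii_choir | src/utils/chord_utils.py | _find_note_tokens
-- ===== SOURCE A (Python) =====
-- def _find_note_tokens(content: str) -> list[tuple[int, int, str]]:
--     """按 token 边界扫描，返回所有音符/和弦 token 的 (start, end, text)。排除命令、休止等。"""
--     result = []
--     n = len(content)
--     i = 0
--     while i < n:
--         if content[i] in " \t\n|[]()":
--             i += 1
--             continue
--         j = i
--         while j < n and content[j] not in " \t\n|[]()":
--             j += 1
--         tok = content[i:j]
--         if "{" in tok or "}" in tok or tok.startswith("\\"):
--             i = j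
--             continue
--         if not tok or tok in ("-", "_"):
--             i = j
--             continue
--         if any(c in "1234567" for c in tok):
--             result.append((i, j, tok))
--         i = j
--     return result
-- ===== SOURCE B (Python) =====
-- _DELIMS = set(" \t\n|[]()")
-- _DIGITS = "1234567"
--
--
-- def _flush(result, start, stop, buf):
--     tok = "".join(buf)
--     if "{" in tok or "}" in tok or tok.startswith("\\"):
--         return
--     if tok in ("-", "_"):
--         return
--     if any(c in _DIGITS for c in tok):
--         result.append((start, stop, tok))
--
--
-- def _find_note_tokens(content: str) -> list[tuple[int, int, str]]:
--     result = []
--     start = 0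
--     buf = []
--     for i, c in enumerate(content):
--         if c in _DELIMS:
--             if buf:
--                 _flush(result, start, i, buf)
--                 buf = []
--         else:
--             if not buf:
--                 start = i
--             buf.append(c)
--     if buf:
--         _flush(result, start, len(content), buf)
--     return result
-- ===== Notes on version B (the rewrite author's own statement) =====
-- stated objective: alternative
-- what changed: A restarts an inner index scan to find each token's end and slices the string; B makes a single character-at-a-time pass that accumulates the current token in an explicit buffer and flushes it at each delimiter or at end of input.
import Mathlib
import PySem

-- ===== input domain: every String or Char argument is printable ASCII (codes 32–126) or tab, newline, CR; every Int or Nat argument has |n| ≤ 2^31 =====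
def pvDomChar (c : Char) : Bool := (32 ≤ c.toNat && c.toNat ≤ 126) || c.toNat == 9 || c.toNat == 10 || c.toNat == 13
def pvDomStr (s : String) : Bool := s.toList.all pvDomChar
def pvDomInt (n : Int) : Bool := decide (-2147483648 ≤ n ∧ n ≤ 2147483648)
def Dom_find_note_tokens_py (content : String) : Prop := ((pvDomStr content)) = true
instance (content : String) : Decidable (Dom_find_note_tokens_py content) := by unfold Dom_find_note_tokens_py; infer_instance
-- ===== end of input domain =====

-- B replaces A's restartable inner index scan + slice with one char-at-a-time pass over the
-- string keeping an explicit token buffer (alternative decomposition; same O(n) cost).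

-- delimiter set " \t\n|[]()" and note-digit set "1234567" (char-in-string membership)
def pvDelims : List Char := [' ', '\t', '\n', '|', '[', ']', '(', ')']
def pvDigits : List Char := ['1', '2', '3', '4', '5', '6', '7']

-- ===== PORT A =====
-- inner `while j < n and content[j] not in " \t\n|[]()": j += 1`
def aScan (l : List Char) (n j : Nat) : Nat :=
  if _h : j < n then
    if pvDelims.contains (l.getD j ' ') then j else aScan l n (j + 1)
  else j
termination_by n - j

theorem aScan_ge (l : List Char) (n j : Nat) : j ≤ aScan l n j := by
  unfold aScan
  split
  · split
    · exact Nat.le_refl _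
    · exact Nat.le_trans (Nat.le_succ j) (aScan_ge l n (j + 1))
  · exact Nat.le_refl _
termination_by n - j

theorem aScan_gt (l : List Char) (n i : Nat) (h : i < n)
    (hc : pvDelims.contains (l.getD i ' ') = false) : i < aScan l n i := by
  unfold aScan
  rw [dif_pos h, if_neg (by rw [hc]; exact Bool.false_ne_true)]
  exact Nat.lt_of_lt_of_le (Nat.lt_succ_self i) (aScan_ge l n (i + 1))

-- outer while loop of A; `tok = content[i:j]` is `(l.drop i).take (j - i)`, exact since 0 ≤ i ≤ j
def aLoop (l : List Char) (n i : Nat) (acc : List (Int × Int × String)) :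
    List (Int × Int × String) :=
  if h : i < n then
    if hd : pvDelims.contains (l.getD i ' ') then aLoop l n (i + 1) acc
    else
      let j := aScan l n i
      let tokL := (l.drop i).take (j - i)
      let tok := String.ofList tokL
      if tokL.contains '{' || tokL.contains '}' || tokL.head? == some '\\' then
        aLoop l n j acc
      else if tokL.isEmpty || tok == "-" || tok == "_" then
        aLoop l n j acc
      else if tokL.any (fun c => pvDigits.contains c) then
        aLoop l n j (acc ++ [((i : Int), (j : Int), tok)])
      else
        aLoop l n j acc
  else acc
termination_by n - i
decreasing_by
  · omega
  all_goals
    have := aScan_gt l n i (by omega) (by simpa using hd)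
    omega

def find_note_tokens_py (content : String) : List (Int × Int × String) :=
  aLoop content.toList content.toList.length 0 []

-- ===== PORT B =====
-- `_flush`: filter the finished token and append (start, stop, tok) if it is a note/chord
def bFlush (acc : List (Int × Int × String)) (start stop : Nat) (buf : List Char) :
    List (Int × Int × String) :=
  let tok := String.ofList buf
  if buf.contains '{' || buf.contains '}' || buf.head? == some '\\' then acc
  else if tok == "-" || tok == "_" then acc
  else if buf.any (fun c => pvDigits.contains c) then acc ++ [((start : Int), (stop : Int), tok)]
  else acc

-- the `for i, c in enumerate(content)` loop of B, with the trailing flush when chars run out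
def bLoop (chars : List Char) (i start : Nat) (buf : List Char)
    (acc : List (Int × Int × String)) : List (Int × Int × String) :=
  match chars with
  | [] => if buf.isEmpty then acc else bFlush acc start i buf
  | c :: rest =>
    if pvDelims.contains c then
      if buf.isEmpty then bLoop rest (i + 1) start [] acc
      else bLoop rest (i + 1) start [] (bFlush acc start i buf)
    else
      if buf.isEmpty then bLoop rest (i + 1) i [c] acc
      else bLoop rest (i + 1) start (buf ++ [c]) acc

def find_note_tokens_py_alt (content : String) : List (Int × Int × String) :=
  bLoop content.toList 0 0 [] []

-- ===== PRECONDITION & SPEC =====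
def Spec_find_note_tokens_py (content : String) (out : List (Int × Int × String)) : Prop := out = find_note_tokens_py_alt content
instance (content : String) (out : List (Int × Int × String)) : Decidable (Spec_find_note_tokens_py content out) := by unfold Spec_find_note_tokens_py; infer_instance

-- ===== CLAIM (what is proved, stated in full; the proofs are below) =====
def Claim_equal_find_note_tokens_py : Prop := ∀ (content : String), Dom_find_note_tokens_py content → Spec_find_note_tokens_py content (find_note_tokens_py content)

-- ===== LEMMAS AND PROOFS =====

-- skipping non-delimiter positions does not change where the inner scan stops
theorem aScan_skip (l : List Char) (n k i : Nat) (hk : k ≤ i) (hi : i ≤ n)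
    (hnd : ∀ m, k ≤ m → m < i → pvDelims.contains (l.getD m ' ') = false) :
    aScan l n k = aScan l n i := by
  rcases Nat.eq_or_lt_of_le hk with h | h
  · rw [h]
  · have h1 : aScan l n k = aScan l n (k + 1) := by
      conv_lhs => rw [aScan.eq_def]
      rw [dif_pos (by omega),
        if_neg (by rw [hnd k (Nat.le_refl k) h]; exact Bool.false_ne_true)]
    rw [h1]
    exact aScan_skip l n (k + 1) i h hi (fun m hm hm' => hnd m (by omega) hm')
termination_by i - k

theorem aScan_stop (l : List Char) (n i : Nat)
    (h : ¬ (i < n ∧ pvDelims.contains (l.getD i ' ') = false)) : aScan l n i = i := by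
  rw [aScan.eq_def]
  split
  · rename_i hlt
    have ht : pvDelims.contains (l.getD i ' ') = true := by
      rcases Bool.eq_false_or_eq_true (pvDelims.contains (l.getD i ' ')) with ht | hf
      · exact ht
      · exact absurd ⟨hlt, hf⟩ h
    rw [if_pos ht]
  · rfl

-- A's filter-and-append chain on a nonempty token computes bFlush
theorem bFlush_eq (acc : List (Int × Int × String)) (s j : Nat) (buf : List Char)
    (hne : buf ≠ []) :
    (if buf.contains '{' || buf.contains '}' || buf.head? == some '\\' then acc
     else if buf.isEmpty || String.ofList buf == "-" || String.ofList buf == "_" then acc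
     else if buf.any (fun c => pvDigits.contains c) then
       acc ++ [((s : Int), (j : Int), String.ofList buf)]
     else acc) = bFlush acc s j buf := by
  unfold bFlush
  rw [List.isEmpty_eq_false_iff.mpr hne]
  simp only [Bool.false_or]

mutual
-- buf empty: B at position i behaves like A restarted at i
theorem bridgeFresh (l : List Char) (i s : Nat) (acc : List (Int × Int × String))
    (hin : i ≤ l.length) :
    bLoop (l.drop i) i s [] acc = aLoop l l.length i acc := by
  rcases Nat.eq_or_lt_of_le hin with h | h
  · rw [h, List.drop_length]
    unfold bLoop aLoop
    simp
  · rw [List.drop_eq_getElem_cons h]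
    unfold bLoop
    simp only [List.isEmpty_nil, if_true]
    by_cases hd : pvDelims.contains l[i] = true
    · rw [if_pos hd, bridgeFresh l (i + 1) s acc (by omega)]
      conv_rhs => unfold aLoop
      rw [dif_pos h, dif_pos (by rwa [List.getD_eq_getElem l ' ' h])]
    · rw [if_neg hd]
      have := bridgeMid l (i + 1) i acc (Nat.lt_succ_self i) (by omega)
        (fun m hm hm' => by
          have : m = i := by omega
          subst this
          rw [List.getD_eq_getElem l ' ' h]
          exact Bool.not_eq_true _ ▸ hd)
      rwa [show (l.drop i).take (i + 1 - i) = [l[i]] by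
        rw [show i + 1 - i = 1 by omega, List.take_one, List.head?_drop,
          List.getElem?_eq_getElem h]
        rfl] at this
  termination_by (l.length - i, 0)

-- buf = content[s:i], all of content[s:i] non-delimiter: B mid-token at i behaves like A at s
theorem bridgeMid (l : List Char) (i s : Nat) (acc : List (Int × Int × String))
    (hs : s < i) (hin : i ≤ l.length)
    (hnd : ∀ m, s ≤ m → m < i → pvDelims.contains (l.getD m ' ') = false) :
    bLoop (l.drop i) i s ((l.drop s).take (i - s)) acc = aLoop l l.length s acc := by
  have hbuflen : ((l.drop s).take (i - s)).length = i - s := by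
    rw [List.length_take, List.length_drop]; omega
  have hbufne : (l.drop s).take (i - s) ≠ [] := by
    intro hc; rw [hc] at hbuflen; simp at hbuflen; omega
  have hbufis : ((l.drop s).take (i - s)).isEmpty = false :=
    List.isEmpty_eq_false_iff.mpr hbufne
  have hsn : s < l.length := Nat.lt_of_lt_of_le hs hin
  have hsd : ¬ pvDelims.contains (l.getD s ' ') = true := by
    intro hh; rw [hnd s (Nat.le_refl s) hs] at hh; exact Bool.false_ne_true hh
  rcases Nat.eq_or_lt_of_le hin with h | h
  · -- i = l.length : the token runs to the end of the string
    subst h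
    have hj : aScan l l.length s = l.length := by
      rw [aScan_skip l l.length s l.length (Nat.le_of_lt hsn) (Nat.le_refl _) hnd]
      exact aScan_stop l l.length l.length (fun hc => absurd hc.1 (lt_irrefl _))
    have hstop : ∀ a, aLoop l l.length l.length a = a := fun a => by
      rw [aLoop.eq_def, dif_neg (lt_irrefl _)]
    rw [List.drop_length]
    conv_rhs => unfold aLoop
    rw [dif_pos hsn, dif_neg hsd]
    simp only [hj, hstop]
    rw [bFlush_eq acc s l.length _ hbufne]
    unfold bLoop
    rw [if_neg (by rw [hbufis]; exact Bool.false_ne_true)]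
  · -- i < l.length : cases on the character at i
    rw [List.drop_eq_getElem_cons h]
    by_cases hd : pvDelims.contains l[i] = true
    · -- delimiter at i: both sides flush the token [s, i)
      have hj : aScan l l.length s = i := by
        rw [aScan_skip l l.length s i (Nat.le_of_lt hs) hin hnd]
        exact aScan_stop l l.length i (fun hc => by
          have hf := hc.2
          rw [List.getD_eq_getElem l ' ' h, hd] at hf
          exact Bool.false_ne_true hf.symm)
      conv_lhs => unfold bLoop
      rw [if_pos hd, if_neg (by rw [hbufis]; exact Bool.false_ne_true),
        bridgeFresh l (i + 1) s (bFlush acc s i ((l.drop s).take (i - s))) (by omega)]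
      have hstep : ∀ a, aLoop l l.length i a = aLoop l l.length (i + 1) a := fun a => by
        conv_lhs => rw [aLoop.eq_def]
        rw [dif_pos h, dif_pos (by rwa [List.getD_eq_getElem l ' ' h])]
      conv_rhs => unfold aLoop
      rw [dif_pos hsn, dif_neg hsd]
      simp only [hj, hstep]
      rw [← apply_ite (aLoop l l.length (i + 1)), ← apply_ite (aLoop l l.length (i + 1)),
        ← apply_ite (aLoop l l.length (i + 1)), bFlush_eq acc s i _ hbufne]
    · -- non-delimiter at i: extend the buffer by one character
      conv_lhs => unfold bLoop
      rw [if_neg hd, if_neg (by rw [hbufis]; exact Bool.false_ne_true)]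
      have hbt : (l.drop s).take (i - s) ++ [l[i]] = (l.drop s).take (i + 1 - s) := by
        rw [show i + 1 - s = (i - s) + 1 by omega, List.take_succ, List.getElem?_drop,
          show s + (i - s) = i by omega, List.getElem?_eq_getElem h]
        rfl
      rw [hbt]
      exact bridgeMid l (i + 1) s acc (by omega) (by omega)
        (fun m hm hm' => by
          rcases Nat.lt_or_ge m i with hmi | hmi
          · exact hnd m hm hmi
          · have : m = i := by omega
            subst this
            rw [List.getD_eq_getElem l ' ' h]
            exact Bool.not_eq_true _ ▸ hd)
  termination_by (l.length - i, 1)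
end

-- ===== VERDICT (by name: the statement is the Claim_ definition above) =====
theorem find_note_tokens_py_spec : Claim_equal_find_note_tokens_py := by
  intro content _
  unfold Spec_find_note_tokens_py find_note_tokens_py find_note_tokens_py_alt
  rw [← bridgeFresh content.toList 0 0 [] (Nat.zero_le _), List.drop_zero]
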